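/- GENERATED by farm/mkstatement.py from design/units.tsv (unit `__asan_register_globals`) and the Specs of Toy/Spec/*.lean — do not edit.
   THE STATEMENT of the proof unit `__asan_register_globals`: the function `__asan_register_globals` (28 instructions) satisfies its contract,
   given the contracts of its callees. What the names mean: ProgX/Base/Spec/Basic.lean. The theorem to prove:
   `theorem asan_register_globals_ok : Toy.Spec.asan_register_globals.Statement`. -/
import Toy.Code
import Toy.Dec.All
import Toy.Labels
import Toy.Spec.Runtime
namespace Toy.Spec.asan_register_globals
open X86 X86.User Asan

/-- The statement of unit `__asan_register_globals`. -/
def Statement : Prop :=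
  ∀ (Lay : Layout) (_hLay : Lay.hi = 0x1000000) (μ : Microarch) (_hμ : UserX.MicroOK μ) (u₀ : State)
    (_hcode : HasCodeNat Lay u₀ ProgX.Base.L.__asan_register_globals.entry ProgX.Base.Code.code___asan_register_globals.nat ProgX.Base.L.__asan_register_globals.size),
    Calls Lay μ ProgX.Base.WayInv (ProgX.Base.conv u₀) ProgX.Base.L.__asan_register_globals.entry (Asan.registerGlobalsSpec Toy.Spec.rt)

end Toy.Spec.asan_register_globals
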